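-- pv_equiv track=rewrite | github.com/adriandavila/advent-of-code | 2023/day_02/part1.py | cube_conundrum
-- ===== SOURCE A (Python) =====
-- from typing import Literal
--
-- MAX_RED = 12
--
-- MAX_GREEN = 13
--
-- MAX_BLUE = 14
--
-- def cube_conundrum(games: list[int, list[list[tuple[int, Literal["blue"] | Literal["red"] | Literal["green"]]]]]) -> int:
--     def is_valid_game(game: list[list[tuple[int, Literal["blue"] | Literal["red"] | Literal["green"]]]]) -> bool:
--         for batch in game:
--             blue_drawn = sum([d[0] for d in batch if d[1] == "blue"])
--             if blue_drawn > MAX_BLUE: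
--                 return False
--
--             red_drawn = sum([d[0] for d in batch if d[1] == "red"])
--             if red_drawn > MAX_RED:
--                 return False
--
--             green_drawn = sum([d[0] for d in batch if d[1] == "green"])
--             if green_drawn > MAX_GREEN:
--                 return False
--
--         return True
--
--     return sum([g[0] for g in games if is_valid_game(g[1])])
-- ===== SOURCE B (Python) =====
-- LIMITS = {"red": 12, "green": 13, "blue": 14}
--
--
-- def cube_conundrum(games):
--     total = 0
--     for game_id, game in games:
--         if all(_batch_ok(batch) for batch in game):
--             total += game_id
--     return total
--
--
-- def _batch_ok(batch):
--     red = green = blue = 0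
--     for n, color in batch:
--         if color == "red":
--             red += n
--         elif color == "green":
--             green += n
--         elif color == "blue":
--             blue += n
--     return red <= LIMITS["red"] and green <= LIMITS["green"] and blue <= LIMITS["blue"]
-- ===== Notes on version B (the rewrite author's own statement) =====
-- stated objective: simpler
-- what changed: Each batch is tallied in ONE accumulating pass over its draws (three running totals with a limits table checked once at the end) instead of A's three separate filter-and-sum scans with per-color early returns, and the ID sum is a running accumulator instead of a filtered comprehension.
import Mathlib
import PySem

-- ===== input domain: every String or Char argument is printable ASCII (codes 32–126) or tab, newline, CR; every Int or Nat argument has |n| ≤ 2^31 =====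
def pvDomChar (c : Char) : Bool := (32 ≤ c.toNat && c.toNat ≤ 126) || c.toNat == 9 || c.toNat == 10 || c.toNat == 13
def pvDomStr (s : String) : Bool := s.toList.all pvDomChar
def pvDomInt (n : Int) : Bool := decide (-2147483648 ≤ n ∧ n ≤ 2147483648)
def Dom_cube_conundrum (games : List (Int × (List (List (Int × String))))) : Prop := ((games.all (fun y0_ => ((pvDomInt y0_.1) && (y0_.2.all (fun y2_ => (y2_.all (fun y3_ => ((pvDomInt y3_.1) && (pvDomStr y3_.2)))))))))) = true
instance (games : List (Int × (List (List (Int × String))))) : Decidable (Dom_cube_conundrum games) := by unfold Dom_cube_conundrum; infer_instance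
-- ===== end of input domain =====

-- B tallies each batch in one accumulating pass (three running totals + a limits check at the end)
-- instead of A's three filter-and-sum scans with per-color early returns; objective: simpler.


-- ===== PORT A =====
-- is_valid_game: loop over batches, three comprehension sums, early return per color
def isValidGame : List (List (Int × String)) → Bool
  | [] => true
  | batch :: rest =>
    let blue_drawn : Int := ((batch.filter (fun d => d.2 == "blue")).map (fun d => d.1)).sum
    if blue_drawn > 14 then false
    else
      let red_drawn : Int := ((batch.filter (fun d => d.2 == "red")).map (fun d => d.1)).sum
      if red_drawn > 12 then false
      else
        let green_drawn : Int := ((batch.filter (fun d => d.2 == "green")).map (fun d => d.1)).sum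
        if green_drawn > 13 then false
        else isValidGame rest

def cube_conundrum (games : List (Int × (List (List (Int × String))))) : Int :=
  ((games.filter (fun g => isValidGame g.2)).map (fun g => g.1)).sum

-- ===== PORT B =====
-- _batch_ok: one accumulating pass over the draws, then one check against the limits
def batchOk (batch : List (Int × String)) : Bool :=
  let t := batch.foldl
    (fun (acc : Int × Int × Int) d =>
      if d.2 == "red" then (acc.1 + d.1, acc.2.1, acc.2.2)
      else if d.2 == "green" then (acc.1, acc.2.1 + d.1, acc.2.2)
      else if d.2 == "blue" then (acc.1, acc.2.1, acc.2.2 + d.1)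
      else acc)
    (0, 0, 0)
  t.1 ≤ 12 && t.2.1 ≤ 13 && t.2.2 ≤ 14

def cube_conundrum_alt (games : List (Int × (List (List (Int × String))))) : Int :=
  games.foldl (fun total g => if g.2.all batchOk then total + g.1 else total) 0

-- ===== PRECONDITION & SPEC =====
def Spec_cube_conundrum (games : List (Int × (List (List (Int × String))))) (out : Int) : Prop := out = cube_conundrum_alt games
instance (games : List (Int × (List (List (Int × String))))) (out : Int) : Decidable (Spec_cube_conundrum games out) := by unfold Spec_cube_conundrum; infer_instance

-- ===== CLAIM (what is proved, stated in full; the proofs are below) =====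
def Claim_equal_cube_conundrum : Prop := ∀ (games : List (Int × (List (List (Int × String))))), Dom_cube_conundrum games → Spec_cube_conundrum games (cube_conundrum games)

-- ===== LEMMAS AND PROOFS =====

-- the one-pass fold computes the three per-color filtered sums (shifted by the accumulator)
theorem batch_fold_eq (batch : List (Int × String)) (acc : Int × Int × Int) :
    batch.foldl
      (fun (acc : Int × Int × Int) d =>
        if d.2 == "red" then (acc.1 + d.1, acc.2.1, acc.2.2)
        else if d.2 == "green" then (acc.1, acc.2.1 + d.1, acc.2.2)
        else if d.2 == "blue" then (acc.1, acc.2.1, acc.2.2 + d.1)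
        else acc)
      acc
    = (acc.1 + ((batch.filter (fun d => d.2 == "red")).map (fun d => d.1)).sum,
       acc.2.1 + ((batch.filter (fun d => d.2 == "green")).map (fun d => d.1)).sum,
       acc.2.2 + ((batch.filter (fun d => d.2 == "blue")).map (fun d => d.1)).sum) := by
  induction batch generalizing acc with
  | nil => simp
  | cons d rest ih =>
    by_cases hr : d.2 == "red" <;> by_cases hg : d.2 == "green" <;> by_cases hb : d.2 == "blue" <;>
      simp_all [ih] <;> ring_nf <;> simp [add_comm, add_left_comm]

-- batch verdicts coincide, hence the whole-game verdicts do
theorem valid_eq_all (game : List (List (Int × String))) :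
    isValidGame game = game.all batchOk := by
  induction game with
  | nil => simp [isValidGame]
  | cons batch rest ih =>
    simp only [isValidGame, List.all_cons, ← ih]
    split_ifs with hb hr hg
    · suffices h : batchOk batch = false by simp [h]
      simp only [batchOk, batch_fold_eq]; simp; omega
    · suffices h : batchOk batch = false by simp [h]
      simp only [batchOk, batch_fold_eq]; simp; omega
    · suffices h : batchOk batch = false by simp [h]
      simp only [batchOk, batch_fold_eq]; simp; omega
    · suffices h : batchOk batch = true by simp [h]
      simp only [batchOk, batch_fold_eq]; simp; omega

-- B's running total equals A's filtered-comprehension sum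
theorem fold_eq_sum (games : List (Int × (List (List (Int × String))))) (init : Int) :
    games.foldl (fun total g => if g.2.all batchOk then total + g.1 else total) init
    = init + ((games.filter (fun g => isValidGame g.2)).map (fun g => g.1)).sum := by
  induction games generalizing init with
  | nil => simp
  | cons g rest ih =>
    simp only [List.foldl_cons, List.filter_cons]
    rw [valid_eq_all g.2]
    by_cases h : g.2.all batchOk = true
    · rw [if_pos h, if_pos h, ih, List.map_cons, List.sum_cons]; ring
    · rw [if_neg h, if_neg h, ih]

-- ===== VERDICT (by name: the statement is the Claim_ definition above) =====
theorem cube_conundrum_spec : Claim_equal_cube_conundrum := by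
  intro games _
  show cube_conundrum games = cube_conundrum_alt games
  rw [cube_conundrum, cube_conundrum_alt, fold_eq_sum, zero_add]
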